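-- pv_equiv track=rewrite | github.com/illuminatrix8/data200_ren_tang | scrabble.py | _generate_words_from_rack
-- ===== SOURCE A (Python) =====
-- from itertools import permutations
--
-- def _generate_words_from_rack(rack):
--     """
--     A helper function that generates all possible words from the given rack, considering wildcards.
--     """
--     rack = rack.upper()
--     possible_words = set()
--
--     # wild card logic still has problem
--     # Test run_scrabble with an input rack of '?a' (0/5)
--     # Test Failed: False is not true : Expected: [(1, 'AA'), (1, 'AB'), (1, 'AD'), (1, 'AE'), (1, 'AG'), (1, 'AH'), (1, 'AI'), (1, 'AL'), (1, 'AM'), (1, 'AN'), (1, 'AR'), (1, 'AS'), (1, 'AT'), (1, 'AW'), (1, 'AX'), (1, 'AY'), (1, 'BA'), (1, 'DA'), (1, 'EA'), (1, 'FA'), (1, 'HA'), (1, 'JA'), (1, 'KA'), (1, 'LA'), (1, 'MA'), (1, 'NA'), (1, 'PA'), (1, 'TA'), (1, 'YA'), (1, 'ZA')]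
--     # Test run_scrabble with an input rack of 'abc*' (0/5)
--     # Test Failed: False is not true : Returned word list result is not the same as expected
--     # Test run_scrabble with an input rack of 'QU*ZZ' (0/5)
--     # Test Failed: False is not true : Returned word list result is not the same as expected
--     # Test run_scrabble with an input rack of '*?' (0/5)
--     # Test Failed: False is not true : Returned word list result is not the same as expected
--
--     if rack.count('*') + rack.count('?') == 2:  # both wildcards present
--         for letter1 in 'ABCDEFGHIJKLMNOPQRSTUVWXYZ':
--             for letter2 in 'ABCDEFGHIJKLMNOPQRSTUVWXYZ':
--                 temp_rack = rack
--                 if '*' in temp_rack: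
--                     temp_rack = temp_rack.replace('*', letter1, 1)
--                 if '?' in temp_rack:
--                     temp_rack = temp_rack.replace('?', letter2, 1)
--                 for length in range(2, len(temp_rack) + 1):
--                     for perm in permutations(temp_rack, length):
--                         possible_words.add(''.join(perm))
--     elif '*' in rack or '?' in rack:  # only one wildcard present
--         for letter in 'ABCDEFGHIJKLMNOPQRSTUVWXYZ':
--             temp_rack = rack
--             if '*' in temp_rack:
--                 temp_rack = temp_rack.replace('*', letter, 1)
--             if '?' in temp_rack:
--                 temp_rack = temp_rack.replace('?', letter, 1)
--             for length in range(2, len(temp_rack) + 1):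
--                 for perm in permutations(temp_rack, length):
--                     possible_words.add(''.join(perm))
--     else: # no wild card, so no need to replace anything
--         for length in range(2, len(rack) + 1):
--             for perm in permutations(rack, length):
--                 possible_words.add(''.join(perm))
--
--     return list(possible_words)
-- ===== SOURCE B (Python) =====
-- def _generate_words_from_rack(rack):
--     rack = rack.upper()
--     letters = 'ABCDEFGHIJKLMNOPQRSTUVWXYZ'
--     if rack.count('*') + rack.count('?') == 2:
--         cands = [rack.replace('*', l1, 1).replace('?', l2, 1)
--                  for l1 in letters for l2 in letters]
--     elif '*' in rack or '?' in rack: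
--         cands = [rack.replace('*', l, 1).replace('?', l, 1) for l in letters]
--     else:
--         cands = [rack]
--     stream = []
--     for cand in cands:
--         # breadth-first walk over the DAG of DISTINCT (word, remaining-pool)
--         # states: duplicate states are merged each level, so duplicate-heavy
--         # racks collapse; expanding only first occurrences never changes which
--         # word appears first in the stream
--         frontier = list(dict.fromkeys(
--             (cand[i], cand[:i] + cand[i + 1:]) for i in range(len(cand))))
--         for _ in range(2, len(cand) + 1):
--             frontier = list(dict.fromkeys(
--                 (w + pool[i], pool[:i] + pool[i + 1:])
--                 for (w, pool) in frontier for i in range(len(pool))))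
--             stream.extend(w for (w, _) in frontier)
--     return list(set(stream))
-- ===== Notes on version B (the rewrite author's own statement) =====
-- stated objective: alternative
-- what changed: B drops itertools.permutations and the result set: it runs a breadth-first expansion over the DAG of distinct (word, remaining-pool) states, merging duplicate states at every level with dict.fromkeys, emits each level into one flat word stream and deduplicates the stream once at the end, instead of A's per-length permutations() calls inserting into a set inside each wildcard branch; on duplicate-heavy racks the state merging collapses the exponential permutation tree.
import Mathlib
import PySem

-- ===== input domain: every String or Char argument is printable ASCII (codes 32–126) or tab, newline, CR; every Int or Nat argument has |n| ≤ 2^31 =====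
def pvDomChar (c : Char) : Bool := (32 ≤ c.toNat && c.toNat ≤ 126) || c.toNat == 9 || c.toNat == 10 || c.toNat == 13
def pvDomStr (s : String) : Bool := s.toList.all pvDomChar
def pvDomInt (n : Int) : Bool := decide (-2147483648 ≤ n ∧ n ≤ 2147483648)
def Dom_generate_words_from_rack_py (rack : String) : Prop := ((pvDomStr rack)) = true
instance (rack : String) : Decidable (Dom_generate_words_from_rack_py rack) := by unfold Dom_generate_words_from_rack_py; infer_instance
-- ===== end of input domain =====

-- B replaces A's per-length itertools.permutations-into-a-set by a breadth-first
-- expansion of DISTINCT (word, remaining-pool) states, emitting one flat word stream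
-- deduplicated once at the end (same return value; both Pythons return the distinct
-- words, ported as the first-occurrence list).

-- ===== PORT A =====
-- the alphabet constant 'ABCDEFGHIJKLMNOPQRSTUVWXYZ' iterated over by both programs
def pvLetters : List Char := "ABCDEFGHIJKLMNOPQRSTUVWXYZ".toList

-- exact hand port of Python's s.replace(old, new, 1) for a SINGLE-CHAR old:
-- replaces the first occurrence of w (if any) by l
def pvReplaceFirst : List Char → Char → Char → List Char
  | [], _, _ => []
  | c :: cs, w, l => if c = w then l :: cs else c :: pvReplaceFirst cs w l

-- A's two-line pattern "if w in temp_rack: temp_rack = temp_rack.replace(w, letter, 1)"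
def pvSubstA (t : List Char) (w l : Char) : List Char :=
  if w ∈ t then pvReplaceFirst t w l else t

-- the inner double loop of A:
-- "for length in range(2, len(t)+1): for perm in permutations(t, length): s.add(''.join(perm))"
def pvAddWords (s : PySem.Set String) (t : List Char) : PySem.Set String :=
  (PySem.List.pyRange 2 ((t.length : Int) + 1) 1).foldl (fun s len =>
    (PySem.List.permutations t len.toNat).foldl
      (fun s perm => PySem.Set.add s (String.ofList perm)) s) s

def generate_words_from_rack_py (rack : String) : List String :=
  let r := PySem.Chars.upper rack.toList
  if r.count '*' + r.count '?' = 2 then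
    pvLetters.foldl (fun s letter1 =>
      pvLetters.foldl (fun s letter2 =>
        pvAddWords s (pvSubstA (pvSubstA r '*' letter1) '?' letter2)) s)
      PySem.Set.empty
  else if '*' ∈ r ∨ '?' ∈ r then
    pvLetters.foldl (fun s letter =>
      pvAddWords s (pvSubstA (pvSubstA r '*' letter) '?' letter))
      PySem.Set.empty
  else
    pvAddWords PySem.Set.empty r

-- ===== PORT B =====
-- one raw expansion step of B's comprehension:
-- "(w + pool[i], pool[:i] + pool[i+1:]) for (w, pool) in frontier for i in range(len(pool))"
-- (pool[i] with i in range(len(pool)) is always in bounds, hence the some-branch)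
def pvStep (frontier : List (List Char × List Char)) : List (List Char × List Char) :=
  frontier.flatMap (fun wp =>
    (List.range wp.2.length).flatMap (fun i =>
      match wp.2[i]? with
      | some c => [(wp.1 ++ [c], wp.2.eraseIdx i)]
      | none => []))

-- B's initial comprehension: "(cand[i], cand[:i] + cand[i+1:]) for i in range(len(cand))"
def pvInit (t : List Char) : List (List Char × List Char) :=
  (List.range t.length).flatMap (fun i =>
    match t[i]? with
    | some c => [([c], t.eraseIdx i)]
    | none => [])

-- B's loop body: "frontier = list(dict.fromkeys(<step>)); stream.extend(w for (w, _) in frontier)"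
def pvLoopF (sf : List String × List (List Char × List Char)) (_ : Int) :
    List String × List (List Char × List Char) :=
  let f := PySem.List.dedup (pvStep sf.2)
  (sf.1 ++ f.map (fun wp => String.ofList wp.1), f)

def generate_words_from_rack_py_alt (rack : String) : List String :=
  let r := PySem.Chars.upper rack.toList
  let cands : List (List Char) :=
    if r.count '*' + r.count '?' = 2 then
      pvLetters.flatMap (fun l1 =>
        pvLetters.map (fun l2 => pvReplaceFirst (pvReplaceFirst r '*' l1) '?' l2))
    else if '*' ∈ r ∨ '?' ∈ r then
      pvLetters.map (fun l => pvReplaceFirst (pvReplaceFirst r '*' l) '?' l)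
    else [r]
  let stream := cands.foldl (fun st cand =>
    ((PySem.List.pyRange 2 ((cand.length : Int) + 1) 1).foldl pvLoopF
      (st, PySem.List.dedup (pvInit cand))).1) []
  PySem.List.dedup stream

-- ===== PRECONDITION & SPEC =====
def Spec_generate_words_from_rack_py (rack : String) (out : List String) : Prop := out = generate_words_from_rack_py_alt rack
instance (rack : String) (out : List String) : Decidable (Spec_generate_words_from_rack_py rack out) := by unfold Spec_generate_words_from_rack_py; infer_instance

-- ===== CLAIM (what is proved, stated in full; the proofs are below) =====
def Claim_equal_generate_words_from_rack_py : Prop := ∀ (rack : String), Dom_generate_words_from_rack_py rack → Spec_generate_words_from_rack_py rack (generate_words_from_rack_py rack)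

-- ===== LEMMAS AND PROOFS =====

theorem pvReplaceFirst_of_not_mem (cs : List Char) (w l : Char) (h : w ∉ cs) :
    pvReplaceFirst cs w l = cs := by
  induction cs with
  | nil => rfl
  | cons c cs ih =>
    simp only [List.mem_cons, not_or] at h
    simp [pvReplaceFirst, Ne.symm h.1, ih h.2]

theorem pvSubstA_eq (t : List Char) (w l : Char) :
    pvSubstA t w l = pvReplaceFirst t w l := by
  by_cases h : w ∈ t
  · simp [pvSubstA, h]
  · simp [pvSubstA, h, pvReplaceFirst_of_not_mem t w l h]

-- the flat list of words A inserts for one candidate rack, in emission order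
def pvWords (t : List Char) : List String :=
  (PySem.List.pyRange 2 ((t.length : Int) + 1) 1).flatMap (fun len =>
    (PySem.List.permutations t len.toNat).map String.ofList)

theorem pvAddWords_eq (s : PySem.Set String) (t : List Char) :
    pvAddWords s t = (pvWords t).foldl PySem.Set.add s := by
  simp [pvAddWords, pvWords, List.foldl_flatMap, List.foldl_map]

-- the UNDEDUPLICATED frontier after k expansion steps: all k-letter partial
-- permutations with their remaining pools
def permsP (t : List Char) : Nat → List (List Char × List Char)
  | 0 => [([], t)]
  | k + 1 => pvStep (permsP t k)

theorem pvInit_eq (t : List Char) : pvInit t = permsP t 1 := by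
  simp only [permsP, pvStep, pvInit, List.flatMap_cons, List.flatMap_nil, List.append_nil]
  apply List.flatMap_congr
  intro i _
  cases t[i]? <;> simp

theorem pvStep_map_cons (c : Char) (l : List (List Char × List Char)) :
    pvStep (l.map (fun pq => (c :: pq.1, pq.2))) =
      (pvStep l).map (fun pq => (c :: pq.1, pq.2)) := by
  simp only [pvStep, List.flatMap_map, List.map_flatMap]
  apply List.flatMap_congr
  intro wp _
  apply List.flatMap_congr
  intro i _
  cases wp.2[i]? <;> simp

theorem permsP_succ (r : Nat) : ∀ (t : List Char),
    permsP t (r + 1) = (List.range t.length).flatMap (fun i =>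
      match t[i]? with
      | some c => (permsP (t.eraseIdx i) r).map (fun pq => (c :: pq.1, pq.2))
      | none => []) := by
  induction r with
  | zero =>
    intro t
    simp only [permsP, pvStep, List.flatMap_cons, List.flatMap_nil, List.append_nil]
    apply List.flatMap_congr
    intro i _
    cases t[i]? <;> simp
  | succ r ih =>
    intro t
    show pvStep (permsP t (r + 1)) = _
    rw [ih t]
    simp only [pvStep, List.flatMap_assoc]
    apply List.flatMap_congr
    intro i _
    cases h : t[i]? with
    | none => simp
    | some c =>
      show pvStep ((permsP (t.eraseIdx i) r).map (fun pq => (c :: pq.1, pq.2))) = _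
      rw [pvStep_map_cons]
      rfl

theorem map_fst_permsP (r : Nat) : ∀ (t : List Char),
    (permsP t r).map Prod.fst = PySem.List.permutations t r := by
  induction r with
  | zero => intro t; simp [permsP, PySem.List.permutations]
  | succ r ih =>
    intro t
    rw [permsP_succ, PySem.List.permutations]
    simp only [List.map_flatMap]
    apply List.flatMap_congr
    intro i _
    cases t[i]? with
    | none => simp
    | some c =>
      simp only [List.map_map]
      rw [← ih (t.eraseIdx i), List.map_map]
      rfl

-- ---- Set/dedup machinery: expanding only the distinct states leaves the word set,
-- ---- and hence the first-occurrence list, unchanged ----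

theorem mem_foldl_add {α : Type} [BEq α] [LawfulBEq α] (l : List α) (s : PySem.Set α)
    (x : α) (h : x ∈ s) : x ∈ l.foldl PySem.Set.add s := by
  induction l generalizing s with
  | nil => exact h
  | cons y l ih => exact ih _ (by simp [PySem.Set.mem_add]; tauto)

theorem mem_foldl_add_of_mem {α : Type} [BEq α] [LawfulBEq α] (l : List α)
    (s : PySem.Set α) (x : α) (h : x ∈ l) : x ∈ l.foldl PySem.Set.add s := by
  induction l generalizing s with
  | nil => cases h
  | cons y l ih =>
    rcases List.mem_cons.mp h with rfl | hx
    · exact mem_foldl_add l _ x (by simp [PySem.Set.mem_add])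
    · exact ih _ hx

theorem foldl_add_of_subset {α : Type} [BEq α] [LawfulBEq α] (l : List α)
    (s : PySem.Set α) (h : ∀ x ∈ l, x ∈ s) : l.foldl PySem.Set.add s = s := by
  induction l with
  | nil => rfl
  | cons y l ih =>
    have hy : PySem.Set.add s y = s := PySem.Set.add_of_mem (h y (by simp))
    simp only [List.foldl_cons, hy]
    exact ih (fun x hx => h x (by simp [hx]))

theorem dedup_append_singleton {α : Type} [BEq α] [LawfulBEq α] (l : List α) (e : α) :
    PySem.List.dedup (l ++ [e]) = PySem.Set.add (PySem.List.dedup l) e := by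
  simp [PySem.List.dedup_eq_ofList, PySem.Set.ofList]

theorem dedup_eq_foldl_add {α : Type} [BEq α] [LawfulBEq α] (l : List α) :
    PySem.List.dedup l = l.foldl PySem.Set.add PySem.Set.empty := by
  rw [PySem.List.dedup_eq_ofList, PySem.Set.ofList_eq_foldl]; rfl

-- the key fact: a flatMap over the deduplicated list feeds a set the same way as
-- the flatMap over the full list (a dropped block repeats an earlier block)
theorem foldl_add_flatMap_dedup {α β : Type} [BEq α] [LawfulBEq α] [BEq β] [LawfulBEq β]
    (g : α → List β) (l : List α) (s : PySem.Set β) :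
    ((PySem.List.dedup l).flatMap g).foldl PySem.Set.add s =
      (l.flatMap g).foldl PySem.Set.add s := by
  induction l using List.reverseRecOn generalizing s with
  | nil => rfl
  | append_singleton l e ih =>
    rw [dedup_append_singleton]
    by_cases he : e ∈ l
    · have hmem : e ∈ PySem.List.dedup l := by simp [he]
      rw [PySem.Set.add_of_mem hmem, ih, List.flatMap_append, List.foldl_append]
      simp only [List.flatMap_cons, List.flatMap_nil, List.append_nil]
      refine (foldl_add_of_subset _ _ (fun x hx => ?_)).symm
      exact mem_foldl_add_of_mem _ _ _ (List.mem_flatMap.mpr ⟨e, he, hx⟩)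
    · have : PySem.Set.add (PySem.List.dedup l) e = PySem.List.dedup l ++ [e] := by
        simp [PySem.Set.add, PySem.Set.contains, he]
      rw [this, List.flatMap_append, List.foldl_append, ih, List.flatMap_append,
        List.foldl_append]

theorem foldl_add_map_dedup {α β : Type} [BEq α] [LawfulBEq α] [BEq β] [LawfulBEq β]
    (f : α → β) (l : List α) (s : PySem.Set β) :
    ((PySem.List.dedup l).map f).foldl PySem.Set.add s =
      (l.map f).foldl PySem.Set.add s := by
  have h := foldl_add_flatMap_dedup (fun x => [f x]) l s
  rwa [← List.map_eq_flatMap, ← List.map_eq_flatMap] at h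

-- expanding the deduplicated frontier gives the same distinct states, in the same
-- first-occurrence order, as expanding the full frontier
theorem dedup_pvStep_dedup (l : List (List Char × List Char)) :
    PySem.List.dedup (pvStep (PySem.List.dedup l)) = PySem.List.dedup (pvStep l) := by
  rw [dedup_eq_foldl_add (pvStep (PySem.List.dedup l)), dedup_eq_foldl_add (pvStep l)]
  exact foldl_add_flatMap_dedup _ l _

-- the flat list of words B emits for one candidate rack, in emission order
def pvWordsB (t : List Char) : List String :=
  (PySem.List.pyRange 2 ((t.length : Int) + 1) 1).flatMap (fun len =>
    (PySem.List.dedup (permsP t len.toNat)).map (fun wp => String.ofList wp.1))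

-- the per-candidate loop: starting from the deduplicated frontier of level a,
-- folding pvLoopF over pyRange (a+1) b appends exactly pvWordsB's blocks
theorem loop_spec (t : List Char) : ∀ (n : Nat) (a : Nat) (b : Int),
    b - ((a : Int) + 1) ≤ (n : Int) → ∀ (st : List String),
    ((PySem.List.pyRange ((a : Int) + 1) b 1).foldl pvLoopF
        (st, PySem.List.dedup (permsP t a))).1 =
      st ++ (PySem.List.pyRange ((a : Int) + 1) b 1).flatMap (fun len =>
        (PySem.List.dedup (permsP t len.toNat)).map (fun wp => String.ofList wp.1)) := by
  intro n
  induction n with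
  | zero =>
    intro a b hb st
    rw [PySem.List.pyRange_one_eq_nil (by omega)]
    simp
  | succ n ih =>
    intro a b hb st
    by_cases hab : b ≤ (a : Int) + 1
    · rw [PySem.List.pyRange_one_eq_nil hab]; simp
    · rw [PySem.List.pyRange_one_cons (by omega)]
      simp only [List.foldl_cons, List.flatMap_cons]
      have hfr : PySem.List.dedup (pvStep (PySem.List.dedup (permsP t a))) =
          PySem.List.dedup (permsP t (a + 1)) := by
        rw [dedup_pvStep_dedup]; rfl
      have hstep : pvLoopF (st, PySem.List.dedup (permsP t a)) ((a : Int) + 1) =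
          (st ++ (PySem.List.dedup (permsP t (a + 1))).map (fun wp => String.ofList wp.1),
            PySem.List.dedup (permsP t (a + 1))) := by
        simp only [pvLoopF, hfr]
      rw [hstep]
      have hcast : ((a : Int) + 1) + 1 = ((a + 1 : Nat) : Int) + 1 := by push_cast; ring
      have htoNat : ((a : Int) + 1).toNat = a + 1 := by omega
      rw [hcast]
      rw [ih (a + 1) b (by push_cast; omega) _]
      rw [htoNat, List.append_assoc]

theorem cand_stream (t : List Char) (st : List String) :
    ((PySem.List.pyRange 2 ((t.length : Int) + 1) 1).foldl pvLoopF
        (st, PySem.List.dedup (pvInit t))).1 = st ++ pvWordsB t := by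
  rw [pvInit_eq, pvWordsB]
  have h2 : (2 : Int) = ((1 : Nat) : Int) + 1 := by norm_num
  rw [h2]
  exact loop_spec t t.length 1 ((t.length : Int) + 1) (by push_cast; omega) st

-- B's block for one candidate feeds a set exactly as A's block does
theorem fold_block (t : List Char) (s : PySem.Set String) :
    (pvWordsB t).foldl PySem.Set.add s = (pvWords t).foldl PySem.Set.add s := by
  rw [pvWordsB, pvWords, List.foldl_flatMap, List.foldl_flatMap]
  apply PySem.List.foldl_congr_mem
  intro acc len _
  rw [foldl_add_map_dedup]
  rw [← map_fst_permsP len.toNat t, List.map_map]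
  rfl

theorem stream_eq (cands : List (List Char)) :
    PySem.List.dedup (cands.foldl (fun st cand =>
        ((PySem.List.pyRange 2 ((cand.length : Int) + 1) 1).foldl pvLoopF
          (st, PySem.List.dedup (pvInit cand))).1) []) =
      cands.foldl (fun s cand => pvAddWords s cand) PySem.Set.empty := by
  have h1 : cands.foldl (fun st cand =>
      ((PySem.List.pyRange 2 ((cand.length : Int) + 1) 1).foldl pvLoopF
        (st, PySem.List.dedup (pvInit cand))).1) [] =
      cands.foldl (fun st cand => st ++ pvWordsB cand) [] :=
    PySem.List.foldl_congr_mem cands _ _ [] (fun acc x _ => cand_stream x acc)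
  have h2 : cands.foldl (fun s cand => (pvWordsB cand).foldl PySem.Set.add s)
        PySem.Set.empty =
      cands.foldl (fun s cand => pvAddWords s cand) PySem.Set.empty :=
    PySem.List.foldl_congr_mem cands _ _ PySem.Set.empty
      (fun acc x _ => (fold_block x acc).trans (pvAddWords_eq acc x).symm)
  rw [h1, PySem.List.foldl_append_eq_flatMap, List.nil_append, dedup_eq_foldl_add,
      List.foldl_flatMap]
  exact h2

-- ===== VERDICT (by name: the statement is the Claim_ definition above) =====
theorem generate_words_from_rack_py_spec : Claim_equal_generate_words_from_rack_py := by
  intro rack _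
  unfold Spec_generate_words_from_rack_py
  unfold generate_words_from_rack_py generate_words_from_rack_py_alt
  simp only []
  set r := PySem.Chars.upper rack.toList with hr
  by_cases h2 : r.count '*' + r.count '?' = 2
  · simp only [if_pos h2]
    rw [stream_eq, List.foldl_flatMap]
    simp [List.foldl_map, pvSubstA_eq]
  · by_cases h1 : '*' ∈ r ∨ '?' ∈ r
    · simp only [if_neg h2, if_pos h1]
      rw [stream_eq]
      simp [List.foldl_map, pvSubstA_eq]
    · simp only [if_neg h2, if_neg h1]
      rw [stream_eq]
      rfl
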